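-- pv_equiv track=rewrite | github.com/hpcyhr/SparseFlow | Utils/sparse_helpers.py | choose_group_size
-- ===== SOURCE A (Python) =====
-- def choose_group_size(k_dim: int) -> int:
--     """
--     Select GROUP_SIZE for the reduction dimension.
--     Matches conv2d.py convention: 16 for k<=128, else 32, capped so
--     NUM_GROUPS <= 32 (fits in a uint32 bitmask).
--     """
--     if k_dim <= 128:
--         gs = 16
--     else:
--         gs = 32
--     num_groups = (k_dim + gs - 1) // gs
--     while num_groups > 32:
--         gs *= 2
--         num_groups = (k_dim + gs - 1) // gs
--     return gs
-- ===== SOURCE B (Python) =====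
-- def choose_group_size(k_dim: int) -> int:
--     if k_dim <= 128:
--         return 16
--     # smallest gs = 32 * 2**j with ceil(k_dim/gs) <= 32, i.e. 2**j >= ceil(k_dim/1024)
--     target = (k_dim + 1023) // 1024
--     return 32 << (target - 1).bit_length()
-- ===== Notes on version B (the rewrite author's own statement) =====
-- stated objective: simpler
-- what changed: Replaces A's iterative doubling loop (recomputing the group count each pass) with a closed-form computation: target = ceil(k_dim/1024), returned size is 32 shifted left by (target-1).bit_length().
import Mathlib
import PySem

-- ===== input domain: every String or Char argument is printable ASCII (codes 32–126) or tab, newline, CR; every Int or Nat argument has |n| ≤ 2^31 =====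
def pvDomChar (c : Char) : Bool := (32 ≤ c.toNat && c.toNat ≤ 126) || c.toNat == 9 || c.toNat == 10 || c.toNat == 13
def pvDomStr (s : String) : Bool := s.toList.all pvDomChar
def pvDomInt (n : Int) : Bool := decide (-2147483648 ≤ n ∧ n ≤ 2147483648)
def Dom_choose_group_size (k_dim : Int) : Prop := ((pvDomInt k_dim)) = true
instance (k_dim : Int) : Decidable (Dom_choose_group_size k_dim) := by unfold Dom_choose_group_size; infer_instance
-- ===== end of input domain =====

-- B replaces A's doubling loop by a closed-form bit-length computation of the needed power of two (objective: simpler).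

-- ===== PORT A =====
-- the while loop, with fuel (64 steps is always enough on Dom; fuel only makes the loop total)
def cgsLoop : Nat → Int → Int → Int
  | 0, _, gs => gs
  | f+1, k, gs =>
    if PySem.Int.floordiv (k + gs - 1) gs > 32 then cgsLoop f k (gs * 2) else gs

def choose_group_size (k_dim : Int) : Int :=
  let gs : Int := if k_dim ≤ 128 then 16 else 32
  cgsLoop 64 k_dim gs

-- ===== PORT B =====
-- (target - 1).bit_length() is Nat.size of (target - 1).toNat (target ≥ 1 in this branch)
def choose_group_size_alt (k_dim : Int) : Int :=
  if k_dim ≤ 128 then 16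
  else
    let target := PySem.Int.floordiv (k_dim + 1023) 1024
    32 * 2 ^ (Nat.size (target - 1).toNat)

-- ===== PRECONDITION & SPEC =====
def Spec_choose_group_size (k_dim : Int) (out : Int) : Prop := out = choose_group_size_alt k_dim
instance (k_dim : Int) (out : Int) : Decidable (Spec_choose_group_size k_dim out) := by unfold Spec_choose_group_size; infer_instance

-- ===== CLAIM (what is proved, stated in full; the proofs are below) =====
def Claim_equal_choose_group_size : Prop := ∀ (k_dim : Int), Dom_choose_group_size k_dim → Spec_choose_group_size k_dim (choose_group_size k_dim)

-- ===== LEMMAS AND PROOFS =====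

theorem cgs_fdiv_eq_ediv (a b : Int) (hb : 0 ≤ b) : PySem.Int.floordiv a b = a / b := by
  simp [PySem.Int.floordiv, Int.fdiv_eq_ediv_of_nonneg _ hb]

-- the loop condition at gs = 32 * 2^j says exactly k > 1024 * 2^j
theorem cgs_cond_iff (k : Int) (j : Nat) :
    (PySem.Int.floordiv (k + 32 * 2 ^ j - 1) (32 * 2 ^ j) > 32) ↔ 1024 * 2 ^ j < k := by
  have hgs : (0 : Int) < 32 * 2 ^ j := by positivity
  rw [cgs_fdiv_eq_ediv _ _ hgs.le, gt_iff_lt,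
    show ∀ x : Int, 32 < x ↔ 33 ≤ x from fun x => by omega,
    Int.le_ediv_iff_mul_le hgs]
  constructor <;> intro h <;> nlinarith

-- m > j  ↔  k > 1024 * 2^j, where m = size (target-1).toNat, for k ≥ 129
theorem cgs_size_iff (k : Int) (hk : 129 ≤ k) (j : Nat) :
    j < Nat.size (PySem.Int.floordiv (k + 1023) 1024 - 1).toNat ↔ 1024 * 2 ^ j < k := by
  set t : Int := PySem.Int.floordiv (k + 1023) 1024 with ht
  have htd : t = (k + 1023) / 1024 := cgs_fdiv_eq_ediv _ _ (by norm_num)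
  have ht1 : 1 ≤ t := by rw [htd]; omega
  rw [← Nat.not_le, Nat.size_le, Nat.not_lt, Int.le_toNat (by omega)]
  push_cast
  constructor
  · intro h
    have h2 : 2 ^ j + 1 ≤ t := by omega
    rw [htd, Int.le_ediv_iff_mul_le (by norm_num : (0:Int) < 1024)] at h2
    nlinarith
  · intro h
    have h2 : ((2:Int) ^ j + 1) * 1024 ≤ k + 1023 := by nlinarith
    have := (Int.le_ediv_iff_mul_le (by norm_num : (0:Int) < 1024)).mpr h2
    rw [← htd] at this
    omega

-- loop characterisation: from gs = 32 * 2^j with enough fuel, result is 32 * 2^(max j m)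
theorem cgs_loop_eq (k : Int) (hk : 129 ≤ k)
    (m : Nat) (hm : m = Nat.size (PySem.Int.floordiv (k + 1023) 1024 - 1).toNat) :
    ∀ (f j : Nat), m ≤ j + f → cgsLoop f k (32 * 2 ^ j) = 32 * 2 ^ (max j m) := by
  intro f
  induction f with
  | zero =>
    intro j hj
    simp only [cgsLoop]
    have : max j m = j := by omega
    rw [this]
  | succ f ih =>
    intro j hj
    simp only [cgsLoop]
    by_cases h : 1024 * 2 ^ j < k
    · have hc : PySem.Int.floordiv (k + 32 * 2 ^ j - 1) (32 * 2 ^ j) > 32 :=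
        (cgs_cond_iff k j).mpr h
      rw [if_pos hc]
      have hjm : j < m := by rw [hm]; exact (cgs_size_iff k hk j).mpr h
      have : (32 : Int) * 2 ^ j * 2 = 32 * 2 ^ (j + 1) := by ring
      rw [this, ih (j + 1) (by omega)]
      have : max (j + 1) m = max j m := by omega
      rw [this]
    · have hc : ¬ PySem.Int.floordiv (k + 32 * 2 ^ j - 1) (32 * 2 ^ j) > 32 := by
        rw [cgs_cond_iff]; exact h
      rw [if_neg hc]
      have hjm : ¬ j < m := by rw [hm, cgs_size_iff k hk j]; exact h
      have : max j m = j := by omega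
      rw [this]

-- ===== VERDICT (by name: the statement is the Claim_ definition above) =====
theorem choose_group_size_spec : Claim_equal_choose_group_size := by
  intro k hdom
  unfold Spec_choose_group_size choose_group_size choose_group_size_alt
  simp only [Dom_choose_group_size, pvDomInt, decide_eq_true_eq] at hdom
  by_cases hk : k ≤ 128
  · -- A: first loop check fails (ceil(k/16) ≤ 32), returns 16; B returns 16
    rw [if_pos hk, if_pos hk]
    show cgsLoop 64 k 16 = 16
    simp only [cgsLoop]
    have : ¬ PySem.Int.floordiv (k + 16 - 1) 16 > 32 := by
      rw [cgs_fdiv_eq_ediv _ _ (by norm_num)]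
      omega
    rw [if_neg this]
  · rw [if_neg hk, if_neg hk]
    have hk' : 129 ≤ k := by omega
    set t : Int := PySem.Int.floordiv (k + 1023) 1024 with ht
    set m : Nat := Nat.size (t - 1).toNat with hm
    have hmb : m ≤ 64 := by
      rw [hm, Nat.size_le]
      have htd : t = (k + 1023) / 1024 := cgs_fdiv_eq_ediv _ _ (by norm_num)
      have : t ≤ 2097153 := by rw [htd]; omega
      have : (t - 1).toNat ≤ 2097152 := by omega
      calc (t - 1).toNat ≤ 2097152 := this
        _ < 2 ^ 64 := by norm_num
    have := cgs_loop_eq k hk' m hm 64 0 (by omega)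
    simp only [pow_zero, mul_one] at this
    rw [this]
    have : max 0 m = m := by omega
    rw [this]
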